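-- pv_equiv track=rewrite | github.com/pokerdio/generic | cf/cf-71c.py | go
-- ===== SOURCE A (Python) =====
-- from math import sqrt
-- import itertools as it
--
-- def primez(n):
--     v = [1] * (n + 1)
--     for i in range(2, int(sqrt(n)) + 1):
--         if v[i]:
--             for j in range(i * 2, n + 1, i):
--                 v[j] = 0
--     return [x for x in range(2, n + 1) if v[x]]
--
-- def decompose(n):
--     vp = primez(n)
--     ret = []
--     for p in vp:
--         x = [1]
--         while n % p == 0:
--             n //= p
--             x.append(p * x[-1])
--         if len(x) > 1:
--             ret.append(x)
--         if n == 1: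
--             break
--     return ret
--
-- def divz(n):
--     for c in it.product(*decompose(n)):
--         ret = 1
--         for x in c:
--             ret *= x
--         yield ret
--
-- def go(v):
--     n = len(v)
--     for d in divz(n):
--         if n // d >= 3:
--             ok = [1] * d
--             for i, mood in enumerate(v):
--                 ok[i % d] &= mood
--
--             if 1 in ok:
--                 return True
-- ===== SOURCE B (Python) =====
-- def go(v):
--     n = len(v)
--     for d in range(1, n // 3 + 1):
--         if n % d == 0:
--             blocked = set()
--             for i, x in enumerate(v):
--                 if not (x & 1):
--                     blocked.add(i % d)
--             if len(blocked) < d: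
--                 return True
-- ===== Notes on version B (the rewrite author's own statement) =====
-- stated objective: simpler
-- what changed: Replaces A's prime-sieve/factorisation/itertools-product divisor pipeline with direct trial-division enumeration of the divisors d <= n//3, and replaces the per-residue bitwise-AND accumulator array by a set of residues blocked by an even element (a class is all-odd iff its residue is missing from the set).
import Mathlib
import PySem

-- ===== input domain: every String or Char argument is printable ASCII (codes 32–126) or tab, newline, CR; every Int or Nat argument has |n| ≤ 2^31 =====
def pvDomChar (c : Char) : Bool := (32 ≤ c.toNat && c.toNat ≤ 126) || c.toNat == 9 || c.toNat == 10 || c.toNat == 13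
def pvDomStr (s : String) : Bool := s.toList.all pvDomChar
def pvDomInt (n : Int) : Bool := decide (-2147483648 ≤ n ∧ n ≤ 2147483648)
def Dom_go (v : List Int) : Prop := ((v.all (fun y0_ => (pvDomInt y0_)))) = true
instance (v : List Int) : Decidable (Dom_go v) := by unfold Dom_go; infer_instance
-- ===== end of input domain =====

-- B replaces A's sieve/factorise/itertools-product divisor pipeline by plain trial-division
-- divisor enumeration, and the AND-accumulator row by a set of blocked residues (objective:
-- simpler).

-- ===== PORT A =====
-- primez(n): the sieve.  `int(sqrt(n))` is ported as `Nat.sqrt n` (exact for n ≤ 2^52,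
-- far beyond any list length the domain reaches); list indexing v[i]/v[j] is always in
-- range here (i, j ≤ n < n+1 = len v), ported as getD/set; Python truthiness `if v[i]`
-- is `≠ 0` on these 0/1 flags; range(a,b,s) is List.range' a ⌈(b-a)/s⌉ s, element for element.
def sieveInner (n : Nat) (w : List Nat) (i : Nat) : List Nat :=
  (List.range' (i * 2) ((n + 1 - i * 2 + (i - 1)) / i) i).foldl (fun w' j => w'.set j 0) w

def sieveFlags (n : Nat) : List Nat :=
  (List.range' 2 (Nat.sqrt n + 1 - 2) 1).foldl
    (fun w i => if w.getD i 0 ≠ 0 then sieveInner n w i else w)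
    (List.replicate (n + 1) 1)

def primez (n : Nat) : List Nat :=
  (List.range' 2 (n + 1 - 2) 1).filter (fun x => (sieveFlags n).getD x 0 ≠ 0)

-- the `while n % p == 0` loop of decompose; x[-1] is getLastD (x is never empty).
-- The guards 2 ≤ p / 0 < n only make the recursion total: Python diverges there, and
-- decompose never reaches that state (every p comes from primez, so 2 ≤ p, and n ≥ 1 whenever vp ≠ []).
def extract (p : Nat) (n : Nat) (x : List Nat) : List Nat × Nat :=
  if h : n % p = 0 ∧ 2 ≤ p ∧ 0 < n then
    extract p (n / p) (x ++ [p * x.getLastD 1])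
  else (x, n)
termination_by n
decreasing_by exact Nat.div_lt_self h.2.2 (by omega)

-- decompose's loop over vp with the `break` after `if n == 1`.
def decomposeAux (n : Nat) : List Nat → List (List Nat)
  | [] => []
  | p :: rest =>
    let r := extract p n [1]
    let pre := if r.1.length > 1 then [r.1] else []
    if r.2 = 1 then pre else pre ++ decomposeAux r.2 rest

def decompose (n : Nat) : List (List Nat) := decomposeAux n (primez n)

-- divz: itertools.product of the power lists, each tuple multiplied out.
def products : List (List Nat) → List Nat
  | [] => [1]
  | xs :: rest => xs.flatMap (fun a => (products rest).map (fun b => a * b))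

-- the inner `for i, mood in enumerate(v): ok[i % d] &= mood` (indices i % d < d are in range).
def okRow (d : Nat) (v : List Int) : List Int :=
  v.zipIdx.foldl
    (fun ok p => ok.set (p.2 % d) (PySem.Int.band (ok.getD (p.2 % d) 0) p.1))
    (List.replicate d (1 : Int))

-- the `for d in divz(n)` loop with its early `return True`.
def goLoop (v : List Int) (n : Nat) : List Nat → Option Bool
  | [] => none
  | d :: rest =>
    if 3 ≤ n / d then
      if (1 : Int) ∈ okRow d v then some true else goLoop v n rest
    else goLoop v n rest

def go (v : List Int) : Option Bool :=
  let n := v.length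
  goLoop v n (products (decompose n))

-- ===== PORT B =====
-- residues (i % d) of the positions i holding an even element, as a Python set.
def blockedRow (d : Nat) (v : List Int) : PySem.Set Nat :=
  v.zipIdx.foldl
    (fun s p => if PySem.Int.band p.1 1 = 0 then PySem.Set.add s (p.2 % d) else s)
    PySem.Set.empty

-- B's `for d in range(1, n // 3 + 1)` loop with its early `return True`.
def goAltLoop (v : List Int) (n : Nat) : List Nat → Option Bool
  | [] => none
  | d :: rest =>
    if n % d = 0 then
      if (blockedRow d v).length < d then some true else goAltLoop v n rest
    else goAltLoop v n rest

def go_alt (v : List Int) : Option Bool :=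
  let n := v.length
  goAltLoop v n (List.range' 1 (n / 3) 1)

-- ===== PRECONDITION & SPEC =====
def Spec_go (v : List Int) (out : Option Bool) : Prop := out = go_alt v
instance (v : List Int) (out : Option Bool) : Decidable (Spec_go v out) := by unfold Spec_go; infer_instance

-- ===== CLAIM (what is proved, stated in full; the proofs are below) =====
def Claim_equal_go : Prop := ∀ (v : List Int), Dom_go v → Spec_go v (go v)

-- ===== LEMMAS AND PROOFS =====

-- ---- generic fold invariants ----
theorem foldl_inv {α β : Type} (P : β → Prop) (f : β → α → β) :
    ∀ (l : List α) (b : β), P b → (∀ b a, a ∈ l → P b → P (f b a)) → P (l.foldl f b) := by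
  intro l
  induction l with
  | nil => intro b hb _; simpa using hb
  | cons x xs ih =>
      intro b hb hstep
      exact ih (f b x) (hstep b x (by simp) hb)
        (fun b' a ha hb' => hstep b' a (by simp [ha]) hb')

-- ---- parity helpers ----
theorem band_one_eq (m : Int) : PySem.Int.band m 1 = m % 2 := by
  rw [PySem.Int.band_one]
  simp [pysem]


theorem band_acc_eq (a m : Int) (ha : a = 0 ∨ a = 1) :
    PySem.Int.band a m = if a = 1 ∧ m % 2 = 1 then 1 else 0 := by
  rcases ha with h | h <;> subst h
  · rw [PySem.Int.band_comm, PySem.Int.band_zero]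
    rcases Int.emod_two_eq m with h2 | h2 <;> simp [h2]
  · rw [PySem.Int.band_comm, band_one_eq]
    rcases Int.emod_two_eq m with h2 | h2 <;> simp [h2]


-- ---- okRow characterisation ----
theorem okrow_fold_getD (d r : Nat) (hr : r < d) :
    ∀ (l : List (Int × Nat)) (ok : List Int), ok.length = d →
      (l.foldl (fun ok p => ok.set (p.2 % d) (PySem.Int.band (ok.getD (p.2 % d) 0) p.1)) ok).getD r 0
        = (l.filter (fun p => decide (p.2 % d = r))).foldl
            (fun a p => PySem.Int.band a p.1) (ok.getD r 0) := by
  intro l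
  induction l with
  | nil => intro ok _; simp
  | cons p l ih =>
      intro ok hlen
      by_cases hpr : p.2 % d = r
      · have hset : (ok.set r (PySem.Int.band (ok.getD r 0) p.1)).getD r 0
            = PySem.Int.band (ok.getD r 0) p.1 := by
          simp only [List.getD_eq_getElem?_getD, List.getElem?_set]
          simp [hlen, hr]
        simp only [List.foldl_cons, List.filter_cons, hpr, decide_true, if_true]
        rw [ih _ (by simp [hlen]), hset]
      · have hset : (ok.set (p.2 % d) (PySem.Int.band (ok.getD (p.2 % d) 0) p.1)).getD r 0
            = ok.getD r 0 := by
          simp only [List.getD_eq_getElem?_getD, List.getElem?_set]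
          simp [hpr]
        simp only [List.foldl_cons, List.filter_cons, hpr, decide_false, Bool.false_eq_true,
          if_false]
        rw [ih _ (by simp [hlen]), hset]

theorem band_fold_eq (l : List (Int × Nat)) :
    l.foldl (fun a p => PySem.Int.band a p.1) 1
      = if ∀ p ∈ l, p.1 % 2 = 1 then 1 else 0 := by
  have main : ∀ (l : List (Int × Nat)) (a : Int), a = 0 ∨ a = 1 →
      l.foldl (fun a p => PySem.Int.band a p.1) a
        = if a = 1 ∧ ∀ p ∈ l, p.1 % 2 = 1 then 1 else 0 := by
    intro l
    induction l with
    | nil => rintro a (rfl | rfl) <;> simp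
    | cons p l ih =>
        intro a ha
        simp only [List.foldl_cons]
        rw [band_acc_eq _ _ ha]
        by_cases h1 : a = 1 ∧ p.1 % 2 = 1
        · rw [if_pos h1, ih 1 (Or.inr rfl)]
          by_cases h2 : ∀ q ∈ l, q.1 % 2 = 1
          · rw [if_pos ⟨rfl, h2⟩, if_pos ⟨h1.1, by intro q hq; rcases List.mem_cons.1 hq with rfl | hq; exact h1.2; exact h2 q hq⟩]
          · rw [if_neg (by rintro ⟨-, h⟩; exact h2 h), if_neg (by rintro ⟨-, h⟩; exact h2 (fun q hq => h q (List.mem_cons_of_mem _ hq)))]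
        · rw [if_neg h1, ih 0 (Or.inl rfl)]
          rw [if_neg (by rintro ⟨h, -⟩; exact absurd h (by norm_num)),
            if_neg (by rintro ⟨h, hall⟩; exact h1 ⟨h, hall p (List.mem_cons_self)⟩)]
  rw [main l 1 (Or.inr rfl)]
  by_cases hP : ∀ p ∈ l, p.1 % 2 = 1
  · rw [if_pos ⟨rfl, hP⟩, if_pos hP]
  · rw [if_neg (fun h => hP h.2), if_neg hP]

theorem okRow_length (d : Nat) (v : List Int) : (okRow d v).length = d := by
  unfold okRow
  refine foldl_inv (fun ok : List Int => ok.length = d) _ _ _ (by simp) ?_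
  intro ok p _ h
  simp [h]


theorem okRow_getD (d : Nat) (v : List Int) (r : Nat) (hr : r < d) :
    (okRow d v).getD r 0
      = if ∀ p ∈ v.zipIdx, p.2 % d = r → p.1 % 2 = 1 then 1 else 0 := by
  unfold okRow
  rw [okrow_fold_getD d r hr _ _ (by simp)]
  rw [List.getD_eq_getElem _ _ (by simp [hr]), List.getElem_replicate]
  rw [band_fold_eq]
  congr 1
  simp only [eq_iff_iff]
  constructor
  · intro h p hp hpd
    exact h p (List.mem_filter.2 ⟨hp, by simp [hpd]⟩)
  · intro h p hp
    rcases List.mem_filter.1 hp with ⟨hp1, hp2⟩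
    exact h p hp1 (by simpa using hp2)


theorem mem_okRow (d : Nat) (v : List Int) (hd : 0 < d) :
    ((1 : Int) ∈ okRow d v)
      ↔ ∃ r < d, ∀ p ∈ v.zipIdx, p.2 % d = r → p.1 % 2 = 1 := by
  constructor
  · intro h
    rcases List.mem_iff_getElem.1 h with ⟨r, hrlen, hval⟩
    have hr : r < d := by rwa [okRow_length] at hrlen
    refine ⟨r, hr, ?_⟩
    have := okRow_getD d v r hr
    rw [List.getD_eq_getElem _ _ hrlen, hval] at this
    by_contra hno
    push Not at hno
    rcases hno with ⟨p, hp, hpd, hodd⟩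
    rw [if_neg (by intro hall; exact hodd (hall p hp hpd))] at this
    norm_num at this
  · rintro ⟨r, hr, hall⟩
    have hval := okRow_getD d v r hr
    rw [if_pos hall] at hval
    have hrlen : r < (okRow d v).length := by rw [okRow_length]; exact hr
    rw [List.getD_eq_getElem _ _ hrlen] at hval
    exact hval ▸ List.getElem_mem hrlen


-- ---- blockedRow characterisation ----
theorem mem_blockedRow (d : Nat) (v : List Int) (r : Nat) :
    r ∈ blockedRow d v ↔ ∃ p ∈ v.zipIdx, p.2 % d = r ∧ p.1 % 2 = 0 := by
  have main : ∀ (l : List (Int × Nat)) (s : PySem.Set Nat),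
      (r ∈ l.foldl (fun s p => if PySem.Int.band p.1 1 = 0 then PySem.Set.add s (p.2 % d) else s) s
        ↔ r ∈ s ∨ ∃ p ∈ l, p.2 % d = r ∧ p.1 % 2 = 0) := by
    intro l
    induction l with
    | nil => intro s; simp
    | cons p l ih =>
        intro s
        simp only [List.foldl_cons]
        rw [ih]
        by_cases hpe : p.1 % 2 = 0
        · rw [if_pos (by rw [band_one_eq]; exact hpe)]
          rw [PySem.Set.mem_add]
          constructor
          · rintro (⟨hs | hval⟩ | ⟨q, hq, hqr, hqe⟩)
            · exact Or.inl hs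
            · exact Or.inr ⟨p, by simp, hval.symm, hpe⟩
            · exact Or.inr ⟨q, by simp [hq], hqr, hqe⟩
          · rintro (hs | ⟨q, hq, hqr, hqe⟩)
            · exact Or.inl (Or.inl hs)
            · rcases List.mem_cons.1 hq with rfl | hq
              · exact Or.inl (Or.inr hqr.symm)
              · exact Or.inr ⟨q, hq, hqr, hqe⟩
        · rw [if_neg (by rw [band_one_eq]; exact hpe)]
          constructor
          · rintro (hs | ⟨q, hq, hqr, hqe⟩)
            · exact Or.inl hs
            · exact Or.inr ⟨q, by simp [hq], hqr, hqe⟩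
          · rintro (hs | ⟨q, hq, hqr, hqe⟩)
            · exact Or.inl hs
            · rcases List.mem_cons.1 hq with rfl | hq
              · exact absurd hqe hpe
              · exact Or.inr ⟨q, hq, hqr, hqe⟩
  unfold blockedRow
  rw [main]
  simp [PySem.Set.empty]


theorem nodup_blockedRow (d : Nat) (v : List Int) : (blockedRow d v).Nodup := by
  unfold blockedRow
  refine foldl_inv (fun s : PySem.Set Nat => s.Nodup) _ _ _ (by simp [PySem.Set.empty]) ?_
  intro s p _ h
  by_cases hb : PySem.Int.band p.1 1 = 0
  · rw [if_pos hb]; exact PySem.Set.nodup_add s _ h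
  · rw [if_neg hb]; exact h


theorem blockedRow_length_lt (d : Nat) (v : List Int) (hd : 0 < d) :
    (blockedRow d v).length < d ↔ ∃ r < d, r ∉ blockedRow d v := by
  have hlt : ∀ x ∈ blockedRow d v, x < d := by
    intro x hx
    rcases (mem_blockedRow d v x).1 hx with ⟨p, _, hpr, _⟩
    exact hpr ▸ Nat.mod_lt _ hd
  constructor
  · intro hlen
    by_contra hno
    push Not at hno
    have hsub : List.range d ⊆ blockedRow d v := by
      intro x hx
      exact hno x (List.mem_range.1 hx)
    have := (List.Nodup.subperm (List.nodup_range) hsub).length_le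
    rw [List.length_range] at this
    omega
  · rintro ⟨r, hr, hnot⟩
    have hsub : blockedRow d v ⊆ (List.range d).erase r := by
      intro x hx
      refine (List.mem_erase_of_ne (fun h : x = r => hnot (h ▸ hx))).2 (List.mem_range.2 (hlt x hx))
    have := (List.Nodup.subperm (nodup_blockedRow d v) hsub).length_le
    rw [List.length_erase_of_mem (List.mem_range.2 hr), List.length_range] at this
    omega


theorem row_iff (d : Nat) (v : List Int) (hd : 0 < d) :
    ((1 : Int) ∈ okRow d v) ↔ (blockedRow d v).length < d := by
  rw [mem_okRow d v hd, blockedRow_length_lt d v hd]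
  refine exists_congr fun r => and_congr_right fun _ => ?_
  rw [mem_blockedRow]
  constructor
  · rintro h ⟨p, hp, hpr, hpe⟩
    have := h p hp hpr
    omega
  · intro h p hp hpr
    rcases Int.emod_two_eq p.1 with he | he
    · exact absurd ⟨p, hp, hpr, he⟩ h
    · exact he


-- ---- loop shapes ----
theorem goLoop_eq (v : List Int) (n : Nat) (ds : List Nat) :
    goLoop v n ds
      = if ∃ d ∈ ds, 3 ≤ n / d ∧ (1 : Int) ∈ okRow d v then some true else none := by
  induction ds with
  | nil => simp [goLoop]
  | cons d rest ih =>
      by_cases h1 : 3 ≤ n / d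
      · by_cases h2 : (1 : Int) ∈ okRow d v
        · simp [goLoop, h1, h2]
        · simp [goLoop, h1, h2, ih]
      · simp [goLoop, h1, ih]


theorem goAltLoop_eq (v : List Int) (n : Nat) (ds : List Nat) :
    goAltLoop v n ds
      = if ∃ d ∈ ds, n % d = 0 ∧ (blockedRow d v).length < d then some true else none := by
  induction ds with
  | nil => simp [goAltLoop]
  | cons d rest ih =>
      by_cases h1 : n % d = 0
      · by_cases h2 : (blockedRow d v).length < d
        · simp [goAltLoop, h1, h2]
        · simp [goAltLoop, h1, h2, ih]
      · simp [goAltLoop, h1, ih]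


-- ---- extract ----
theorem extract_spec (p : Nat) (hp : 2 ≤ p) :
    ∀ n, 0 < n → ∀ x : List Nat,
      ∃ e, extract p n x = (x ++ (List.range e).map (fun j => x.getLastD 1 * p ^ (j + 1)), n / p ^ e)
        ∧ p ^ e ∣ n ∧ ¬ p ∣ n / p ^ e := by
  intro n
  induction n using Nat.strong_induction_on with
  | _ n ih =>
    intro hn x
    by_cases hd : n % p = 0
    · have hpd : p ∣ n := Nat.dvd_of_mod_eq_zero hd
      have hlt : n / p < n := Nat.div_lt_self hn (by omega)
      have hpos : 0 < n / p := Nat.div_pos (Nat.le_of_dvd hn hpd) (by omega)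
      obtain ⟨e, heq, hdvd, hnd⟩ := ih (n / p) hlt hpos (x ++ [p * x.getLastD 1])
      have hL : (x ++ [p * x.getLastD 1]).getLastD 1 = p * x.getLastD 1 :=
        by simp
      have hdiv2 : n / p / p ^ e = n / p ^ (e + 1) := by
        rw [Nat.div_div_eq_div_mul, pow_succ']
      refine ⟨e + 1, ?_, ?_, ?_⟩
      · rw [extract, dif_pos ⟨hd, hp, hn⟩, heq]
        simp only [Prod.mk.injEq]
        constructor
        · rw [hL, List.append_assoc, List.singleton_append, List.range_succ_eq_map,
            List.map_cons, List.map_map]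
          congr 1
          rw [List.cons_eq_cons]
          constructor
          · ring
          · exact List.map_congr_left fun j _ => by
              simp only [Function.comp_apply, Nat.succ_eq_add_one]; ring
        · exact hdiv2
      · rw [pow_succ']
        calc p * p ^ e ∣ p * (n / p) := mul_dvd_mul_left p hdvd
        _ = n := Nat.mul_div_cancel' hpd
      · rwa [← hdiv2]
    · refine ⟨0, ?_, by simp, ?_⟩
      · rw [extract, dif_neg (by rintro ⟨h, -, -⟩; exact hd h)]
        simp
      · simpa using fun h => hd (Nat.mod_eq_zero_of_dvd h)


-- ---- primez ----
theorem primez_sorted (n : Nat) : (primez n).Pairwise (· < ·) := by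
  exact List.Pairwise.sublist List.filter_sublist (List.pairwise_lt_range' (s := 2) (n := n + 1 - 2) 1)


theorem primez_mem_range (n : Nat) : ∀ q ∈ primez n, 2 ≤ q ∧ q ≤ n := by
  intro q hq
  rcases List.mem_filter.1 hq with ⟨hmem, -⟩
  rcases List.mem_range'_1.1 hmem with ⟨h2, hlt⟩
  omega


theorem primez_complete (n : Nat) : ∀ p, p.Prime → p ≤ n → p ∈ primez n := by
  intro p hp hpn
  have hp2 := hp.two_le
  have hflag : ∀ j, j < n + 1 → (sieveFlags n).getD j 0 = 0 → ¬ j.Prime := by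
    unfold sieveFlags
    refine foldl_inv (fun w : List Nat => ∀ j, j < n + 1 → w.getD j 0 = 0 → ¬ j.Prime) _ _ _
      ?_ ?_
    · intro j hj h0
      rw [List.getD_eq_getElem?_getD, List.getElem?_replicate, if_pos hj] at h0
      simp at h0
    · intro w i hi hP
      by_cases hflag : w.getD i 0 ≠ 0
      · rw [if_pos hflag]
        have hi2 : 2 ≤ i := (List.mem_range'.1 hi).elim fun k hk => by omega
        unfold sieveInner
        refine foldl_inv (fun w : List Nat => ∀ j, j < n + 1 → w.getD j 0 = 0 → ¬ j.Prime) _ _ _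
          hP ?_
        intro w' j hj hP' m hm h0
        rcases List.mem_range'.1 hj with ⟨k, -, rfl⟩
        rw [List.getD_eq_getElem?_getD, List.getElem?_set] at h0
        by_cases hem : i * 2 + i * k = m
        · subst hem
          intro hpr
          have hdvd : i ∣ i * 2 + i * k := ⟨2 + k, by ring⟩
          rcases hpr.eq_one_or_self_of_dvd i hdvd with h1 | h1
          · omega
          · have h2 : i * 2 + i * k = i * (2 + k) := by ring
            have hgt : i * (2 + k) > i := by
              have : 2 + k ≥ 2 := by omega
              calc i * (2 + k) ≥ i * 2 := Nat.mul_le_mul_left i this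
              _ > i := by omega
            omega
        · rw [if_neg hem] at h0
          exact hP' m hm (by rwa [List.getD_eq_getElem?_getD])
      · rw [if_neg hflag]
        exact hP
  refine List.mem_filter.2 ⟨List.mem_range'_1.2 ⟨hp2, by omega⟩, ?_⟩
  simp only [decide_eq_true_eq]
  intro h0
  exact hflag p (by omega) h0 hp


-- ---- the divisor-set theorem ----
theorem mem_products_cons (xs : List Nat) (ls : List (List Nat)) (d : Nat) :
    d ∈ products (xs :: ls) ↔ ∃ a ∈ xs, ∃ b ∈ products ls, d = a * b := by
  simp only [products, List.mem_flatMap, List.mem_map]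
  constructor
  · rintro ⟨a, ha, b, hb, rfl⟩
    exact ⟨a, ha, b, hb, rfl⟩
  · rintro ⟨a, ha, b, hb, rfl⟩
    exact ⟨a, ha, b, hb, rfl⟩

theorem mem_products_decomposeAux :
    ∀ (vp : List Nat) (n : Nat), 0 < n → vp.Pairwise (· < ·) → (∀ q ∈ vp, 2 ≤ q) →
      (∀ p, p.Prime → p ∣ n → p ∈ vp) →
      ∀ d, d ∈ products (decomposeAux n vp) ↔ d ∣ n := by
  intro vp
  induction vp with
  | nil =>
      intro n hn _ _ hall d
      have hn1 : n = 1 := by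
        by_contra h
        obtain ⟨q, hq, hqd⟩ := Nat.exists_prime_and_dvd h
        exact absurd (hall q hq hqd) (List.not_mem_nil)
      subst hn1
      simp [decomposeAux, products, Nat.dvd_one]
  | cons p rest ih =>
      intro n hn hsort h2 hall d
      have hp2 : 2 ≤ p := h2 p (by simp)
      obtain ⟨e, heq, hdvd, hnd⟩ := extract_spec p hp2 n hn [1]
      rw [show [(1 : Nat)].getLastD 1 = 1 from rfl] at heq
      have hdec : decomposeAux n (p :: rest)
          = if n / p ^ e = 1
            then (if ([1] ++ (List.range e).map (fun j => 1 * p ^ (j + 1))).length > 1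
                  then [[1] ++ (List.range e).map (fun j => 1 * p ^ (j + 1))] else [])
            else (if ([1] ++ (List.range e).map (fun j => 1 * p ^ (j + 1))).length > 1
                  then [[1] ++ (List.range e).map (fun j => 1 * p ^ (j + 1))] else [])
              ++ decomposeAux (n / p ^ e) rest := by
        simp only [decomposeAux, heq]
      have hX : ∀ a : Nat, a ∈ [1] ++ (List.range e).map (fun j => 1 * p ^ (j + 1))
          ↔ ∃ j ≤ e, a = p ^ j := by
        intro a
        simp only [List.singleton_append, List.mem_cons, List.mem_map, List.mem_range, one_mul]
        constructor
        · rintro (rfl | ⟨j, hj, rfl⟩)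
          · exact ⟨0, by omega, by simp⟩
          · exact ⟨j + 1, by omega, rfl⟩
        · rintro ⟨j, hj, rfl⟩
          match j with
          | 0 => exact Or.inl (by simp)
          | j + 1 => exact Or.inr ⟨j, by omega, rfl⟩
      have hXlen : ([1] ++ (List.range e).map (fun j => 1 * p ^ (j + 1))).length = e + 1 := by
        simp
      have hn'pos : 0 < n / p ^ e :=
        Nat.div_pos (Nat.le_of_dvd hn hdvd) (Nat.pow_pos (by omega))
      have hnfac : n = p ^ e * (n / p ^ e) := (Nat.mul_div_cancel' hdvd).symm
      by_cases hpn : p ∣ n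
      · have hprime : p.Prime := by
          by_contra hnp
          obtain ⟨q, hq, hqp⟩ := Nat.exists_prime_and_dvd (n := p) (by omega)
          have hqn : q ∣ n := hqp.trans hpn
          rcases List.mem_cons.1 (hall q hq hqn) with heqq | hmem
          · exact hnp (heqq ▸ hq)
          · have hlt : p < q := (List.pairwise_cons.1 hsort).1 q hmem
            have hle : q ≤ p := Nat.le_of_dvd (by omega) hqp
            omega
        have hdvdpow : ∀ a : Nat, a ∣ p ^ e ↔ ∃ j ≤ e, a = p ^ j :=
          fun a => Nat.dvd_prime_pow hprime
        have he1 : 1 ≤ e := by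
          by_contra h
          have he0 : e = 0 := by omega
          subst he0
          simp only [pow_zero, Nat.div_one] at hnd
          exact hnd hpn
        rw [hdec, hXlen, if_pos (by omega : e + 1 > 1)]
        by_cases hone : n / p ^ e = 1
        · rw [if_pos hone]
          rw [mem_products_cons]
          simp only [products, List.mem_singleton]
          constructor
          · rintro ⟨a, ha, b, hb, rfl⟩
            subst hb
            rw [mul_one]
            have ha' : a ∣ p ^ e := (hdvdpow a).2 ((hX a).1 ha)
            calc a ∣ p ^ e := ha'
            _ ∣ n := hdvd
          · intro hdn
            have hdpe : d ∣ p ^ e := by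
              rw [hnfac, hone, mul_one] at hdn
              exact hdn
            exact ⟨d, (hX d).2 ((hdvdpow d).1 hdpe), 1, rfl, (mul_one d).symm⟩
        · rw [if_neg hone]
          have hih := ih (n / p ^ e) hn'pos (List.pairwise_cons.1 hsort).2
            (fun q hq => h2 q (by simp [hq]))
            (fun q hq hqd => by
              have hqn : q ∣ n := hqd.trans (Nat.div_dvd_of_dvd hdvd)
              rcases List.mem_cons.1 (hall q hq hqn) with heqq | hmem
              · exact absurd (heqq ▸ hqd) hnd
              · exact hmem)
          rw [List.singleton_append, mem_products_cons]
          constructor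
          · rintro ⟨a, ha, b, hb, rfl⟩
            have ha' : a ∣ p ^ e := (hdvdpow a).2 ((hX a).1 ha)
            have hb' : b ∣ n / p ^ e := (hih b).1 hb
            rw [hnfac]
            exact mul_dvd_mul ha' hb'
          · intro hdn
            rw [hnfac] at hdn
            rcases Nat.dvd_mul.1 hdn with ⟨a, b, ha, hb, rfl⟩
            exact ⟨a, (hX a).2 ((hdvdpow a).1 ha), b, (hih b).2 hb, rfl⟩
      · have he0 : e = 0 := by
          by_contra h
          exact hpn ((dvd_pow_self p (by omega : e ≠ 0)).trans hdvd)
        subst he0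
        rw [hdec]
        simp only [List.range_zero, List.map_nil, List.append_nil, pow_zero, Nat.div_one,
          List.length_cons, List.length_nil]
        rw [if_neg (by omega : ¬ (0 + 1 > 1))]
        by_cases hone : n = 1
        · rw [if_pos hone, hone]
          simp [products, Nat.dvd_one]
        · rw [if_neg hone, List.nil_append]
          exact ih n hn (List.pairwise_cons.1 hsort).2 (fun q hq => h2 q (by simp [hq]))
            (fun q hq hqd => by
              rcases List.mem_cons.1 (hall q hq hqd) with heqq | hmem
              · exact absurd (heqq ▸ hqd) hpn
              · exact hmem) d
theorem mem_products_decompose (n : Nat) (hn : 0 < n) (d : Nat) :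
    d ∈ products (decompose n) ↔ d ∣ n := by
  unfold decompose
  exact mem_products_decomposeAux (primez n) n hn (primez_sorted n)
    (fun q hq => (primez_mem_range n q hq).1)
    (fun p hp hpd => primez_complete n p hp (Nat.le_of_dvd hn hpd)) d


-- ===== VERDICT (by name: the statement is the Claim_ definition above) =====
theorem go_spec : Claim_equal_go := by
  unfold Claim_equal_go Spec_go
  intro v _
  by_cases hn : v.length = 0
  · rw [List.eq_nil_of_length_eq_zero hn]
    decide
  · have hpos : 0 < v.length := Nat.pos_of_ne_zero hn
    simp only [go, go_alt]
    rw [goLoop_eq, goAltLoop_eq]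
    have hiff : (∃ d ∈ products (decompose v.length), 3 ≤ v.length / d ∧ (1 : Int) ∈ okRow d v)
        ↔ ∃ d ∈ List.range' 1 (v.length / 3) 1,
            v.length % d = 0 ∧ (blockedRow d v).length < d := by
      constructor
      · rintro ⟨d, hd, h3, hok⟩
        have hdvd : d ∣ v.length := (mem_products_decompose _ hpos d).1 hd
        have hdpos : 0 < d := Nat.pos_of_dvd_of_pos hdvd hpos
        have h3d : 3 * d ≤ v.length := (Nat.le_div_iff_mul_le hdpos).1 h3
        have hdle : d ≤ v.length / 3 := (Nat.le_div_iff_mul_le (by omega : 0 < 3)).2 (by omega)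
        exact ⟨d, List.mem_range'_1.2 ⟨hdpos, by omega⟩,
          Nat.mod_eq_zero_of_dvd hdvd, (row_iff d v hdpos).1 hok⟩
      · rintro ⟨d, hd, hmod, hblk⟩
        rcases List.mem_range'_1.1 hd with ⟨h1, h2⟩
        have hdvd : d ∣ v.length := Nat.dvd_of_mod_eq_zero hmod
        have hdle : d ≤ v.length / 3 := by omega
        have h3d : d * 3 ≤ v.length := (Nat.le_div_iff_mul_le (by omega : 0 < 3)).1 hdle
        exact ⟨d, (mem_products_decompose _ hpos d).2 hdvd,
          (Nat.le_div_iff_mul_le (by omega : 0 < d)).2 (by omega), (row_iff d v (by omega)).2 hblk⟩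
    rw [if_congr hiff rfl rfl]
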